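-- pv_equiv track=rewrite | github.com/MHZhong1225/BrCPT | utils/sorting_nets.py | parallelize
-- ===== SOURCE A (Python) =====
-- def parallelize(snet_lst):
--   """Organize comparators that can be run in parallel in stages."""
--   stage_sets = [set()]
--   stage = [[]]
--
--   # Flatten the list of stages into a single list of comparators
--   all_comparators = [edge for stage_list in snet_lst for edge in stage_list]
--
--   for edge in all_comparators:
--     edge = tuple(sorted(edge)) # Ensure consistent edge representation
--     placed = False
--     for stage_idx in range(len(stage)):
--       if (edge[0] not in stage_sets[stage_idx]) and \
--          (edge[1] not in stage_sets[stage_idx]):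
--         stage[stage_idx].append(list(edge))
--         stage_sets[stage_idx].update(edge)
--         placed = True
--         break
--     if not placed:
--       stage.append([list(edge)])
--       stage_sets.append(set(edge))
--
--   return [s for s in stage if s] # Return only non-empty stages
-- ===== SOURCE B (Python) =====
-- def parallelize(snet_lst):
--     """Organize comparators that can be run in parallel in stages."""
--     # Peel off successive greedy maximal matchings: each pass over the remaining
--     # comparators builds one whole stage at once, then recurses on the rejects.
--     remaining = [sorted(edge) for stage_list in snet_lst for edge in stage_list]
--     stages = []
--     while remaining:
--         used = set()
--         cur = []
--         rest = []
--         for e in remaining: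
--             if e[0] in used or e[1] in used:
--                 rest.append(e)
--             else:
--                 cur.append(e)
--                 used.update(e)
--         stages.append(cur)
--         remaining = rest
--     return stages
-- ===== Notes on version B (the rewrite author's own statement) =====
-- stated objective: alternative
-- what changed: B peels off whole stages: each outer pass computes one greedy maximal matching over the remaining comparators (keep an edge iff neither wire was used earlier in this pass) and recurses on the rejected edges, instead of A's per-edge first-fit scan over a growing list of per-stage wire sets; equivalence holds because A's stage k only ever receives edges rejected by stages 0..k-1.
-- outside the precondition, e.g. on parallelize([[[1, 2], [1]]]): A returns [[[1, 2]], [[1]]], B raises IndexError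
import Mathlib
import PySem

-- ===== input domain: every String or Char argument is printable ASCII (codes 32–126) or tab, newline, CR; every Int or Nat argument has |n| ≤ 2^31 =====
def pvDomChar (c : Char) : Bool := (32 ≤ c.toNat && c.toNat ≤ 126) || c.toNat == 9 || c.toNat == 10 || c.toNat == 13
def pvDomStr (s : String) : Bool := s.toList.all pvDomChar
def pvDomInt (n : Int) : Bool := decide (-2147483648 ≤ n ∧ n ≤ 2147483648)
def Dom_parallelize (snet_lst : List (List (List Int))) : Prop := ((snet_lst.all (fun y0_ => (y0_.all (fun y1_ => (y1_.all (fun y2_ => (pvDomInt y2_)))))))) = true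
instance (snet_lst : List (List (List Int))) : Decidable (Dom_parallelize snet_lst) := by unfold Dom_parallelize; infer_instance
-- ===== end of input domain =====

-- B builds each stage by one whole pass (a greedy maximal matching over the remaining
-- comparators) and recurses on the rejects, instead of A's per-edge first-fit scan over
-- growing per-stage wire sets; same return value, similar cost (objective: alternative).

-- ===== PORT A =====
-- inner 'for stage_idx in range(len(stage)): if free: place; break' — structural scan of the
-- two parallel lists; 'some' = placed at the first free position, 'none' = no stage was free
def pvPlaceA (e0 e1 : Int) (e : List Int) :
    List (PySem.Set Int) → List (List (List Int)) →
    Option (List (PySem.Set Int) × List (List (List Int)))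
  | s :: ss, g :: gs =>
      if !PySem.Set.contains s e0 && !PySem.Set.contains s e1 then
        some ((PySem.Set.update s e) :: ss, (g ++ [e]) :: gs)
      else
        match pvPlaceA e0 e1 e ss gs with
        | some (ss', gs') => some (s :: ss', g :: gs')
        | none => none
  | _, _ => none

def pvStepA (acc : List (PySem.Set Int) × List (List (List Int))) (edge : List Int) :
    List (PySem.Set Int) × List (List (List Int)) :=
  let e := PySem.List.sorted edge (fun x => x) false        -- edge = tuple(sorted(edge))
  match PySem.List.pyGet? e 0, PySem.List.pyGet? e 1 with   -- edge[0], edge[1]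
  | some e0, some e1 =>
      match pvPlaceA e0 e1 e acc.1 acc.2 with
      | some r => r
      | none => (acc.1 ++ [PySem.Set.ofList e], acc.2 ++ [[e]])
  | _, _ => acc      -- IndexError (edge shorter than 2): excluded by Pre_

def parallelize (snet_lst : List (List (List Int))) : List (List (List Int)) :=
  let all_comparators := snet_lst.flatMap (fun stage_list => stage_list)
  let st := all_comparators.foldl pvStepA ([PySem.Set.empty], [[]])
  st.2.filter (fun s => !s.isEmpty)                          -- [s for s in stage if s]

-- ===== PORT B =====
-- one pass 'for e in remaining: …' accumulating (used, cur, rest)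
def pvPassStep (acc : PySem.Set Int × List (List Int) × List (List Int)) (e : List Int) :
    PySem.Set Int × List (List Int) × List (List Int) :=
  match PySem.List.pyGet? e 0, PySem.List.pyGet? e 1 with    -- e[0], e[1]
  | some a, some b =>
      if PySem.Set.contains acc.1 a || PySem.Set.contains acc.1 b then
        (acc.1, acc.2.1, acc.2.2 ++ [e])                     -- rest.append(e)
      else
        (PySem.Set.update acc.1 e, acc.2.1 ++ [e], acc.2.2)  -- cur.append(e); used.update(e)
  | _, _ => acc      -- IndexError (edge shorter than 2): excluded by Pre_

def pvPass (remaining : List (List Int)) : PySem.Set Int × List (List Int) × List (List Int) :=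
  remaining.foldl pvPassStep (PySem.Set.empty, [], [])

-- the first edge of a pass is never rejected (used is empty), so rest shrinks strictly:
-- this justifies the 'while remaining:' loop's termination
theorem pvPass_rest_le (P : List (List Int))
    (acc : PySem.Set Int × List (List Int) × List (List Int)) :
    (P.foldl pvPassStep acc).2.2.length ≤ acc.2.2.length + P.length := by
  induction P generalizing acc with
  | nil => simp
  | cons e P ih =>
      have hstep : (pvPassStep acc e).2.2.length ≤ acc.2.2.length + 1 := by
        unfold pvPassStep
        cases h0 : PySem.List.pyGet? e 0 with
        | none => simp
        | some a =>
            cases h1 : PySem.List.pyGet? e 1 with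
            | none => simp
            | some b => dsimp only; split_ifs <;> simp
      have := ih (pvPassStep acc e)
      simp only [List.foldl_cons, List.length_cons]
      omega

theorem pvPass_rest_lt (e : List Int) (P : List (List Int)) :
    (pvPass (e :: P)).2.2.length < (e :: P).length := by
  unfold pvPass
  simp only [List.foldl_cons]
  have h : (pvPassStep (PySem.Set.empty, [], []) e).2.2 = [] := by
    unfold pvPassStep
    cases h0 : PySem.List.pyGet? e 0 with
    | none => rfl
    | some a =>
        cases h1 : PySem.List.pyGet? e 1 with
        | none => rfl
        | some b => rfl   -- the condition is decide-false: used is empty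
  have := pvPass_rest_le P (pvPassStep (PySem.Set.empty, [], []) e)
  rw [h] at this
  simp only [List.length_nil, List.length_cons] at this ⊢
  omega

def pvPeel : List (List Int) → List (List (List Int))
  | [] => []                                                  -- while remaining: (exit)
  | e :: P => (pvPass (e :: P)).2.1 :: pvPeel (pvPass (e :: P)).2.2
termination_by l => l.length
decreasing_by simpa using pvPass_rest_lt e P

def parallelize_alt (snet_lst : List (List (List Int))) : List (List (List Int)) :=
  pvPeel (snet_lst.flatMap (fun stage_list =>
    stage_list.map (fun edge => PySem.List.sorted edge (fun x => x) false)))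

-- ===== PRECONDITION & SPEC =====
-- Pre_ excludes comparators with fewer than 2 wires: A raises IndexError on edge[1] for them,
-- except that when the single wire is already occupied in every stage the short-circuited
-- condition never reaches edge[1] and A returns; B's 'e[1]' always raises there.
def Pre_parallelize (snet_lst : List (List (List Int))) : Prop :=
  ∀ stage_list ∈ snet_lst, ∀ edge ∈ stage_list, 2 ≤ edge.length
instance (snet_lst : List (List (List Int))) : Decidable (Pre_parallelize snet_lst) := by
  unfold Pre_parallelize; infer_instance
def pvWitness_parallelize : List (List (List Int)) := [[[1, 2], [3, 4]], [[2, 1], [1, 3]]]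
def Spec_parallelize (snet_lst : List (List (List Int))) (out : List (List (List Int))) : Prop := out = parallelize_alt snet_lst
instance (snet_lst : List (List (List Int))) (out : List (List (List Int))) : Decidable (Spec_parallelize snet_lst out) := by unfold Spec_parallelize; infer_instance

-- ===== CLAIM (what is proved, stated in full; the proofs are below) =====
def Claim_equal_parallelize : Prop := ∀ (snet_lst : List (List (List Int))), Dom_parallelize snet_lst → Pre_parallelize snet_lst → Spec_parallelize snet_lst (parallelize snet_lst)

-- ===== LEMMAS AND PROOFS =====

-- a good edge: at least two wires and already sorted (every edge B's peel sees is one)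
def pvGood (e : List Int) : Prop :=
  2 ≤ e.length ∧ PySem.List.sorted e (fun x => x) false = e

-- pvPassStep's cur/rest only grow at the back: pull the accumulators out
theorem pvPass_acc (P : List (List Int)) (u : PySem.Set Int) (c r : List (List Int)) :
    P.foldl pvPassStep (u, c, r) =
      ((P.foldl pvPassStep (u, [], [])).1,
       c ++ (P.foldl pvPassStep (u, [], [])).2.1,
       r ++ (P.foldl pvPassStep (u, [], [])).2.2) := by
  induction P generalizing u c r with
  | nil => simp
  | cons e P ih =>
      simp only [List.foldl_cons]
      cases h0 : PySem.List.pyGet? e 0 with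
      | none =>
          have hid : ∀ (c r : List (List Int)), pvPassStep (u, c, r) e = (u, c, r) := by
            intro c r; simp only [pvPassStep, h0]
          rw [hid, hid]; exact ih u c r
      | some a =>
          cases h1 : PySem.List.pyGet? e 1 with
          | none =>
              have hid : ∀ (c r : List (List Int)), pvPassStep (u, c, r) e = (u, c, r) := by
                intro c r; simp only [pvPassStep, h0, h1]
              rw [hid, hid]; exact ih u c r
          | some b =>
              have hstepc : ∀ (c r : List (List Int)), pvPassStep (u, c, r) e =
                  if PySem.Set.contains u a || PySem.Set.contains u b then (u, c, r ++ [e])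
                  else (PySem.Set.update u e, c ++ [e], r) := by
                intro c r; simp only [pvPassStep, h0, h1]
              rw [hstepc, hstepc]
              by_cases hc : (PySem.Set.contains u a || PySem.Set.contains u b) = true
              · rw [if_pos hc, if_pos hc]
                rw [ih u c (r ++ [e]), ih u [] ([] ++ [e])]
                simp
              · rw [if_neg hc, if_neg hc]
                rw [ih (PySem.Set.update u e) (c ++ [e]) r,
                    ih (PySem.Set.update u e) ([] ++ [e]) []]
                simp

-- membership in the rejected list
theorem pvPass_rest_mem (P : List (List Int))
    (acc : PySem.Set Int × List (List Int) × List (List Int)) (x : List Int)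
    (hx : x ∈ (P.foldl pvPassStep acc).2.2) : x ∈ acc.2.2 ∨ x ∈ P := by
  induction P generalizing acc with
  | nil => exact Or.inl hx
  | cons e P ih =>
      simp only [List.foldl_cons] at hx
      have hstep : (pvPassStep acc e).2.2 = acc.2.2 ∨ (pvPassStep acc e).2.2 = acc.2.2 ++ [e] := by
        unfold pvPassStep
        cases h0 : PySem.List.pyGet? e 0 with
        | none => exact Or.inl rfl
        | some a =>
            cases h1 : PySem.List.pyGet? e 1 with
            | none => exact Or.inl rfl
            | some b => dsimp only; split_ifs <;> simp
      rcases ih (pvPassStep acc e) hx with h | h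
      · rcases hstep with he | he
        · rw [he] at h; exact Or.inl h
        · rw [he] at h
          rcases List.mem_append.mp h with h | h
          · exact Or.inl h
          · simp at h; simp [h]
      · simp [h]

-- A's step on a state with a distinguished first stage: either the edge conflicts with
-- stage 0 and the step happens entirely in the tail state, or it is placed into stage 0
theorem pvStepA_cons (u : PySem.Set Int) (c : List (List Int))
    (sets : List (PySem.Set Int)) (gA : List (List (List Int)))
    (a b : Int) (r : List Int) (e : List Int) (he : e = a :: b :: r)
    (hs : PySem.List.sorted e (fun x => x) false = e) :
    pvStepA (u :: sets, c :: gA) e =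
      if PySem.Set.contains u a || PySem.Set.contains u b then
        (u :: (pvStepA (sets, gA) e).1, c :: (pvStepA (sets, gA) e).2)
      else
        ((PySem.Set.update u e) :: sets, (c ++ [e]) :: gA) := by
  have h0 : PySem.List.pyGet? e 0 = some a := by rw [he]; simp [PySem.List.pyGet?_zero_cons]
  have h1 : PySem.List.pyGet? e 1 = some b := by
    rw [show (1:Int) = ((1:Nat):Int) from rfl, PySem.List.pyGet?_natCast, he]; rfl
  unfold pvStepA
  simp only [hs, h0, h1]
  rw [pvPlaceA, ← Bool.not_or]
  cases hc : (PySem.Set.contains u a || PySem.Set.contains u b) with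
  | true =>
      rw [if_neg (by simp)]
      cases hrec : pvPlaceA a b e sets gA with
      | none => simp
      | some p => cases p; simp
  | false => rw [if_pos (by simp)]; simp

-- the stratification: running A from (u :: sets, c :: gA) = one pass building stage 0
-- from (u, c), then running A from (sets, gA) on the rejected edges
theorem pvShift : ∀ (P : List (List Int)), (∀ e ∈ P, pvGood e) →
    ∀ (u : PySem.Set Int) (c : List (List Int))
      (sets : List (PySem.Set Int)) (gA : List (List (List Int))),
    P.foldl pvStepA (u :: sets, c :: gA) =
      ((P.foldl pvPassStep (u, c, [])).1 ::
         ((P.foldl pvPassStep (u, c, [])).2.2.foldl pvStepA (sets, gA)).1,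
       (P.foldl pvPassStep (u, c, [])).2.1 ::
         ((P.foldl pvPassStep (u, c, [])).2.2.foldl pvStepA (sets, gA)).2) := by
  intro P
  induction P with
  | nil => intro hP u c sets gA; simp
  | cons e P ih =>
      intro hP u c sets gA
      obtain ⟨h2, hs⟩ := hP e (List.mem_cons_self ..)
      obtain ⟨a, b, r, he⟩ : ∃ a b r, e = a :: b :: r := by
        match e, h2 with
        | a :: b :: r, _ => exact ⟨a, b, r, rfl⟩
      have hP' : ∀ x ∈ P, pvGood x := fun x hx => hP x (List.mem_cons_of_mem e hx)
      have h0 : PySem.List.pyGet? e 0 = some a := by rw [he]; simp [PySem.List.pyGet?_zero_cons]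
      have h1 : PySem.List.pyGet? e 1 = some b := by
        rw [show (1:Int) = ((1:Nat):Int) from rfl, PySem.List.pyGet?_natCast, he]; rfl
      have hstepc : ∀ (c r : List (List Int)), pvPassStep (u, c, r) e =
          if PySem.Set.contains u a || PySem.Set.contains u b then (u, c, r ++ [e])
          else (PySem.Set.update u e, c ++ [e], r) := by
        intro c r; simp only [pvPassStep, h0, h1]
      simp only [List.foldl_cons]
      rw [pvStepA_cons u c sets gA a b r e he hs, hstepc]
      by_cases hc : (PySem.Set.contains u a || PySem.Set.contains u b) = true
      · rw [if_pos hc, if_pos hc]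
        rw [ih hP' u c (pvStepA (sets, gA) e).1 (pvStepA (sets, gA) e).2]
        rw [pvPass_acc P u c ([] ++ [e]), pvPass_acc P u c []]
        simp
      · rw [if_neg hc, if_neg hc]
        rw [ih hP' (PySem.Set.update u e) (c ++ [e]) sets gA]

-- main induction: A run from the empty state produces exactly the peeled stages
theorem pvMain : ∀ (P : List (List Int)), (∀ e ∈ P, pvGood e) →
    (P.foldl pvStepA ([], [])).2 = pvPeel P := by
  intro P
  induction P using pvPeel.induct with
  | case1 => intro _; simp [pvPeel]
  | case2 e P ih =>
      intro hP
      obtain ⟨h2, hs⟩ := hP e (List.mem_cons_self ..)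
      obtain ⟨a, b, r, he⟩ : ∃ a b r, e = a :: b :: r := by
        match e, h2 with
        | a :: b :: r, _ => exact ⟨a, b, r, rfl⟩
      have hP' : ∀ x ∈ P, pvGood x := fun x hx => hP x (List.mem_cons_of_mem e hx)
      have h0 : PySem.List.pyGet? e 0 = some a := by rw [he]; simp [PySem.List.pyGet?_zero_cons]
      have h1 : PySem.List.pyGet? e 1 = some b := by
        rw [show (1:Int) = ((1:Nat):Int) from rfl, PySem.List.pyGet?_natCast, he]; rfl
      -- A's first step from the empty state appends a fresh stage [e]
      have hA0 : pvStepA ([], []) e = ([PySem.Set.ofList e], [[e]]) := by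
        unfold pvStepA; simp only [hs, h0, h1]; rfl
      -- B's first pass step from the empty state accepts e
      have hB0 : pvPassStep (PySem.Set.empty, [], []) e = (PySem.Set.ofList e, [e], []) := by
        simp only [pvPassStep, h0, h1]; rfl
      have hpass : pvPass (e :: P) = P.foldl pvPassStep (PySem.Set.ofList e, [e], []) := by
        unfold pvPass; simp only [List.foldl_cons, hB0]
      have hrest : ∀ x ∈ (pvPass (e :: P)).2.2, pvGood x := by
        intro x hx
        rw [hpass] at hx
        rcases pvPass_rest_mem P (PySem.Set.ofList e, [e], []) x hx with h | h
        · simp at h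
        · exact hP' x h
      have ih' := ih hrest
      rw [hpass] at ih'
      rw [pvPeel, hpass, List.foldl_cons, hA0,
        pvShift P hP' (PySem.Set.ofList e) [e] [] [], ← ih']

-- a successful first-fit placement never creates an empty stage
theorem pvPlaceA_noEmpty (e0 e1 : Int) (e : List Int) :
    ∀ (sets : List (PySem.Set Int)) (gA : List (List (List Int)))
      (s' : List (PySem.Set Int)) (g' : List (List (List Int))),
    pvPlaceA e0 e1 e sets gA = some (s', g') → [] ∉ gA → [] ∉ g' := by
  intro sets
  induction sets with
  | nil => intro gA s' g' h; cases gA <;> simp [pvPlaceA] at h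
  | cons s ss ih =>
      intro gA s' g' h hg
      cases gA with
      | nil => simp [pvPlaceA] at h
      | cons g gs =>
          rw [pvPlaceA] at h
          split_ifs at h with hc
          · injection h with h'
            injection h' with hs' hg'
            rw [← hg']
            intro hmem
            rcases List.mem_cons.mp hmem with hmem | hmem
            · exact (by simp : g ++ [e] ≠ []) hmem.symm
            · exact hg (List.mem_cons_of_mem g hmem)
          · cases hrec : pvPlaceA e0 e1 e ss gs with
            | none => rw [hrec] at h; exact absurd h (by simp)
            | some p =>
                rw [hrec] at h
                injection h with h'
                injection h' with hs' hg'
                rw [← hg']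
                intro hmem
                rcases List.mem_cons.mp hmem with hmem | hmem
                · exact hg (by simp [← hmem])
                · exact ih gs p.1 p.2 (by rw [hrec]) (fun hx => hg (List.mem_cons_of_mem g hx)) hmem

-- A never creates an empty stage (given good edges)
theorem pvNoEmpty : ∀ (P : List (List Int)), (∀ e ∈ P, pvGood e) →
    ∀ (sets : List (PySem.Set Int)) (gA : List (List (List Int))),
    [] ∉ gA → [] ∉ (P.foldl pvStepA (sets, gA)).2 := by
  intro P
  induction P with
  | nil => intro _ sets gA h; exact h
  | cons e P ih =>
      intro hP sets gA hg
      obtain ⟨h2, hs⟩ := hP e (List.mem_cons_self ..)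
      obtain ⟨a, b, r, he⟩ : ∃ a b r, e = a :: b :: r := by
        match e, h2 with
        | a :: b :: r, _ => exact ⟨a, b, r, rfl⟩
      have hne : e ≠ [] := by rw [he]; simp
      have h0 : PySem.List.pyGet? e 0 = some a := by rw [he]; simp [PySem.List.pyGet?_zero_cons]
      have h1 : PySem.List.pyGet? e 1 = some b := by
        rw [show (1:Int) = ((1:Nat):Int) from rfl, PySem.List.pyGet?_natCast, he]; rfl
      have hstep : [] ∉ (pvStepA (sets, gA) e).2 := by
        unfold pvStepA
        simp only [hs, h0, h1]
        cases hpl : pvPlaceA a b e sets gA with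
        | none =>
            dsimp only
            intro hmem
            rcases List.mem_append.mp hmem with h | h
            · exact hg h
            · simp at h
        | some p =>
            dsimp only
            exact pvPlaceA_noEmpty a b e sets gA p.1 p.2 (by rw [hpl]) hg
      simp only [List.foldl_cons]
      exact ih (fun x hx => hP x (List.mem_cons_of_mem e hx)) _ _ hstep

-- A's real initial state [∅],[[]] behaves like [],[] once the final filter is applied
theorem pvBridge (P : List (List Int)) (hP : ∀ e ∈ P, pvGood e) :
    (P.foldl pvStepA ([PySem.Set.empty], [[]])).2.filter (fun s => !s.isEmpty) =
      (P.foldl pvStepA ([], [])).2 := by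
  cases P with
  | nil => rfl
  | cons e P =>
      obtain ⟨h2, hs⟩ := hP e (List.mem_cons_self ..)
      obtain ⟨a, b, r, he⟩ : ∃ a b r, e = a :: b :: r := by
        match e, h2 with
        | a :: b :: r, _ => exact ⟨a, b, r, rfl⟩
      have hne : e ≠ [] := by rw [he]; simp
      have hP' : ∀ x ∈ P, pvGood x := fun x hx => hP x (List.mem_cons_of_mem e hx)
      have h0 : PySem.List.pyGet? e 0 = some a := by rw [he]; simp [PySem.List.pyGet?_zero_cons]
      have h1 : PySem.List.pyGet? e 1 = some b := by
        rw [show (1:Int) = ((1:Nat):Int) from rfl, PySem.List.pyGet?_natCast, he]; rfl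
      have hA1 : pvStepA ([PySem.Set.empty], [[]]) e = ([PySem.Set.ofList e], [[e]]) := by
        unfold pvStepA; simp only [hs, h0, h1]; rfl
      have hA0 : pvStepA ([], []) e = ([PySem.Set.ofList e], [[e]]) := by
        unfold pvStepA; simp only [hs, h0, h1]; rfl
      simp only [List.foldl_cons, hA1, hA0]
      apply List.filter_eq_self.mpr
      intro s hsmem
      have hno : [] ∉ (P.foldl pvStepA ([PySem.Set.ofList e], [[e]])).2 :=
        pvNoEmpty P hP' [PySem.Set.ofList e] [[e]] (by simp)
      have hsne : s ≠ [] := fun h => hno (h ▸ hsmem)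
      simp [hsne]

-- sorting is idempotent, so A's internal sort can be pushed onto the edge list
theorem pvStepA_sorted (acc : List (PySem.Set Int) × List (List (List Int))) (e : List Int) :
    pvStepA acc e = pvStepA acc (PySem.List.sorted e (fun x => x) false) := by
  unfold pvStepA
  rw [PySem.List.sorted_sorted]

-- ===== VERDICT (by name: the statement is the Claim_ definition above) =====
theorem parallelize_spec : Claim_equal_parallelize := by
  intro snet _ hpre
  unfold Spec_parallelize parallelize parallelize_alt
  have hElen : ∀ e ∈ snet.flatMap (fun stage_list => stage_list), 2 ≤ e.length := by
    intro e he
    obtain ⟨st, hst, he'⟩ := List.mem_flatMap.mp he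
    exact hpre st hst e he'
  -- A's internal sorting = pre-sorting the flattened edge list
  have hfold : ∀ (l : List (List Int)) (init : List (PySem.Set Int) × List (List (List Int))),
      l.foldl pvStepA init =
        (l.map (fun e => PySem.List.sorted e (fun x => x) false)).foldl pvStepA init := by
    intro l
    induction l with
    | nil => intro init; rfl
    | cons e l ih =>
        intro init
        simp only [List.map_cons, List.foldl_cons, ← pvStepA_sorted, ih]
  have hmap : snet.flatMap (fun stage_list =>
        stage_list.map (fun edge => PySem.List.sorted edge (fun x => x) false)) =
      (snet.flatMap (fun stage_list => stage_list)).map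
        (fun e => PySem.List.sorted e (fun x => x) false) := by
    rw [List.map_flatMap]
  have hgood : ∀ e ∈ (snet.flatMap (fun stage_list => stage_list)).map
      (fun e => PySem.List.sorted e (fun x => x) false), pvGood e := by
    intro e he
    obtain ⟨e0, he0, rfl⟩ := List.mem_map.mp he
    exact ⟨by rw [PySem.List.length_sorted]; exact hElen e0 he0, PySem.List.sorted_sorted e0 _⟩
  dsimp only
  rw [hmap, hfold, pvBridge _ hgood, pvMain _ hgood]
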